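-- pv_equiv track=rewrite | github.com/Brulljulioantonio/Projecte-6 | 2.5 RA2_FuncionsModuls/2.5 RA2_FuncionsModuls 09.py | estat_persona
-- ===== SOURCE A (Python) =====
-- def estat_persona(edat):
--     resultats = []
--     for i in edat:
--         if i < 18:
--             resultats.append("menor d'edat")
--         elif i < 64:
--             resultats.append("major d'edat")
--         else:
--             resultats.append("jubilat")
--     return resultats
-- ===== SOURCE B (Python) =====
-- def _bisect_right(a, x):
--     # standard binary search: first index where a[index] > x
--     lo, hi = 0, len(a)
--     while lo < hi:
--         mid = (lo + hi) // 2
--         if x < a[mid]: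
--             hi = mid
--         else:
--             lo = mid + 1
--     return lo
--
-- def estat_persona(edat):
--     cuts = [18, 64]
--     labels = ["menor d'edat", "major d'edat", "jubilat"]
--     return [labels[_bisect_right(cuts, i)] for i in edat]
-- ===== Notes on version B (the rewrite author's own statement) =====
-- stated objective: alternative
-- what changed: Replaces the if/elif/else branch cascade with a sorted threshold table and a parallel label table, classifying each age by a hand-written binary search (bisect_right) that returns the index of the age's band.
import Mathlib
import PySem

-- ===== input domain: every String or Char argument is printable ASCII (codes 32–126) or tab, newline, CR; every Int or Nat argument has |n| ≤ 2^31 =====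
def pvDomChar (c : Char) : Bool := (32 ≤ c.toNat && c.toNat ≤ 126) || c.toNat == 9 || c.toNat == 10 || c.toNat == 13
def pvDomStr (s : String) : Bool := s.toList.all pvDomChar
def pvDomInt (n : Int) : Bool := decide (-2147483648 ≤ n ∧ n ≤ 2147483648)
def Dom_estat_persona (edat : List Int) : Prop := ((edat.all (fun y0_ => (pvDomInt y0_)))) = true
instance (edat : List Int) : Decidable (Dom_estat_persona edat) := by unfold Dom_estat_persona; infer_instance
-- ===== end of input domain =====

-- B replaces A's if/elif/else cascade with a sorted threshold table and a binary search
-- (bisect_right) selecting the label index; objective: alternative, same cost.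
-- ===== PORT A =====
-- A: loop appending the chosen label to an accumulator
def estat_persona (edat : List Int) : List String :=
  edat.foldl
    (fun resultats i =>
      if i < 18 then resultats ++ ["menor d'edat"]
      else if i < 64 then resultats ++ ["major d'edat"]
      else resultats ++ ["jubilat"]) []

-- ===== PORT B =====
-- B's binary-search loop (the while of _bisect_right); a[mid] is always in range
-- (0 ≤ lo ≤ mid < hi ≤ len a), so getD's default is never used — exact there.
def pvBisectGo (a : List Int) (x : Int) (lo hi : Nat) : Nat :=
  if lo < hi then
    let mid := (lo + hi) / 2
    if x < a.getD mid 0 then pvBisectGo a x lo mid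
    else pvBisectGo a x (mid + 1) hi
  else lo
termination_by hi - lo
decreasing_by all_goals omega

def pvBisectRight (a : List Int) (x : Int) : Nat := pvBisectGo a x 0 a.length

def estat_persona_alt (edat : List Int) : List String :=
  let cuts : List Int := [18, 64]
  let labels : List String := ["menor d'edat", "major d'edat", "jubilat"]
  edat.map (fun i => labels.getD (pvBisectRight cuts i) "")

-- ===== PRECONDITION & SPEC =====
def Spec_estat_persona (edat : List Int) (out : List String) : Prop := out = estat_persona_alt edat
instance (edat : List Int) (out : List String) : Decidable (Spec_estat_persona edat out) := by unfold Spec_estat_persona; infer_instance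

-- ===== CLAIM (what is proved, stated in full; the proofs are below) =====
def Claim_equal_estat_persona : Prop := ∀ (edat : List Int), Dom_estat_persona edat → Spec_estat_persona edat (estat_persona edat)

-- ===== LEMMAS AND PROOFS =====
lemma pvBisect_eval (i : Int) :
    pvBisectRight [18, 64] i = if i < 18 then 0 else if i < 64 then 1 else 2 := by
  unfold pvBisectRight
  by_cases h18 : i < 18
  · simp [pvBisectGo, h18, show i < 64 by omega]
  · by_cases h64 : i < 64
    · simp [pvBisectGo, h18, h64]
    · simp [pvBisectGo, h18, h64]

lemma foldl_app_map (f : Int → String) (l : List Int) (acc : List String)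
    (h : ∀ i, (if i < 18 then ["menor d'edat"]
      else if i < 64 then ["major d'edat"] else ["jubilat"]) = [f i]) :
    l.foldl (fun resultats i =>
      if i < 18 then resultats ++ ["menor d'edat"]
      else if i < 64 then resultats ++ ["major d'edat"]
      else resultats ++ ["jubilat"]) acc = acc ++ l.map f := by
  induction l generalizing acc with
  | nil => simp
  | cons x xs ih =>
    have hx := h x
    simp only [List.foldl, List.map]
    split_ifs at hx ⊢ <;> simp [ih] <;> simp_all

-- ===== VERDICT (by name: the statement is the Claim_ definition above) =====
theorem estat_persona_spec : Claim_equal_estat_persona := by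
  intro edat _
  unfold Spec_estat_persona estat_persona estat_persona_alt
  rw [foldl_app_map (f := fun i =>
    (["menor d'edat", "major d'edat", "jubilat"] : List String).getD
      (pvBisectRight [18, 64] i) "")]
  · simp
  · intro i
    rw [pvBisect_eval]
    split_ifs <;> rfl
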